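-- pv_equiv track=rewrite | github.com/dgyarmati/algorithms-and-data-structs | src/python/codingame/easy_chuck_norris/chuck_norris_v2.py | create_binary_list_with_separators
-- ===== SOURCE A (Python) =====
-- def create_binary_list_with_separators(binary_string):
--     current_char = binary_string[0]
--     binary_with_separators_list = []
--     for char in binary_string:
--         if char != current_char:
--             binary_with_separators_list.extend([":", char])
--             current_char = char
--         else:
--             binary_with_separators_list.append(char)
--     return binary_with_separators_list
-- ===== SOURCE B (Python) =====
-- def create_binary_list_with_separators(binary_string):
--     runs = []
--     i = 0
--     n = len(binary_string)
--     while i < n: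
--         j = i
--         while j < n and binary_string[j] == binary_string[i]:
--             j += 1
--         runs.append(binary_string[i:j])
--         i = j
--     return list(":".join(runs))
-- ===== Notes on version B (the rewrite author's own statement) =====
-- stated objective: alternative
-- what changed: B extracts maximal runs of equal characters with a two-pointer scan and slices, joins the run-strings with a colon separator and lists the result, instead of A's flat loop threading a current_char state and appending per character.
import Mathlib
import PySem

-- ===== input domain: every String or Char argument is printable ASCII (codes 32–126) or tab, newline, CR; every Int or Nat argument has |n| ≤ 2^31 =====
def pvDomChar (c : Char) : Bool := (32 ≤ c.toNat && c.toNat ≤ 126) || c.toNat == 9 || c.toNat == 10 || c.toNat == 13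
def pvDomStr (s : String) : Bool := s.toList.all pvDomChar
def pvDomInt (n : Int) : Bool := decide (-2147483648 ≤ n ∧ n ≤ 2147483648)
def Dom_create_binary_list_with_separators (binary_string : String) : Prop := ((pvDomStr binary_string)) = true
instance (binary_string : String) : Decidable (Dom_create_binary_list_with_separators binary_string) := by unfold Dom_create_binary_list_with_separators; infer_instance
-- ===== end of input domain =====

-- B splits the string into maximal runs of equal characters (two-pointer scan), joins them with a colon separator and
-- returns the characters of the joined string; A threads a current_char through one flat loop.
-- On the empty string A raises IndexError while B returns [] (see Raises_ below).

-- ===== PORT A =====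
def create_binary_list_with_separators (binary_string : String) : List String :=
  match PySem.Str.pyGet? binary_string 0 with
  | none => []   -- Python raises IndexError here; excluded by Pre_
  | some current_char =>
    let st := binary_string.toList.foldl
      (fun (st : Char × List String) char =>
        if char ≠ st.1 then (char, st.2 ++ [":", char.toString])
        else (st.1, st.2 ++ [char.toString]))
      (current_char, [])
    st.2

-- ===== PORT B =====
-- the inner while loop 'while j < n and s[j] == s[i]' is takeWhile/dropWhile from position i
def pvRuns : List Char → List (List Char)
  | [] => []
  | c :: rest => (c :: rest.takeWhile (· == c)) :: pvRuns (rest.dropWhile (· == c))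
  termination_by l => l.length
  decreasing_by
    simp only [List.length_cons]
    exact Nat.lt_succ_of_le (List.length_dropWhile_le _ _)

def create_binary_list_with_separators_alt (binary_string : String) : List String :=
  -- ":".join(runs) on character lists, then list(...) of the joined string
  (List.intercalate [':'] (pvRuns binary_string.toList)).map (fun c => c.toString)

-- ===== PRECONDITION & SPEC =====
-- Pre_ excludes only the empty string, on which A raises IndexError (binary_string[0]).
def Pre_create_binary_list_with_separators (binary_string : String) : Prop := binary_string ≠ ""
instance (binary_string : String) : Decidable (Pre_create_binary_list_with_separators binary_string) := by unfold Pre_create_binary_list_with_separators; infer_instance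
def pvWitness_create_binary_list_with_separators : String := "1100101"

def Spec_create_binary_list_with_separators (binary_string : String) (out : List String) : Prop := out = create_binary_list_with_separators_alt binary_string
instance (binary_string : String) (out : List String) : Decidable (Spec_create_binary_list_with_separators binary_string out) := by unfold Spec_create_binary_list_with_separators; infer_instance

-- ===== CLAIM (what is proved, stated in full; the proofs are below) =====
def Claim_equal_create_binary_list_with_separators : Prop := ∀ (binary_string : String), Dom_create_binary_list_with_separators binary_string → Pre_create_binary_list_with_separators binary_string → Spec_create_binary_list_with_separators binary_string (create_binary_list_with_separators binary_string)
-- ===== LEMMAS AND PROOFS =====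

-- what A's loop body emits, given the current_char state p
def bodyA : Char → List Char → List String
  | _, [] => []
  | p, c :: rest => if c ≠ p then ":" :: c.toString :: bodyA c rest else c.toString :: bodyA p rest

theorem foldA_eq_bodyA (l : List Char) : ∀ (p : Char) (acc : List String),
    (l.foldl (fun (st : Char × List String) char =>
        if char ≠ st.1 then (char, st.2 ++ [":", char.toString])
        else (st.1, st.2 ++ [char.toString])) (p, acc)).2 = acc ++ bodyA p l := by
  induction l with
  | nil => intro p acc; simp [bodyA]
  | cons c rest ih =>
    intro p acc
    by_cases h : c = p
    · subst h
      rw [List.foldl_cons, if_neg (by simp)]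
      show (List.foldl (fun (st : Char × List String) char =>
          if char ≠ st.1 then (char, st.2 ++ [":", char.toString])
          else (st.1, st.2 ++ [char.toString])) (c, acc ++ [c.toString]) rest).2 = _
      rw [ih]
      simp [bodyA]
    · rw [List.foldl_cons, if_pos (by simpa using h)]
      rw [ih]
      simp [bodyA, h]

theorem intercalate_colon_cons (c : Char) (L : List Char) (rs : List (List Char)) :
    List.intercalate [':'] ((c :: L) :: rs) = c :: List.intercalate [':'] (L :: rs) := by
  cases rs <;> simp [List.intercalate]

theorem intercalate_colon_nil_cons (r : List Char) (rs : List (List Char)) :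
    List.intercalate [':'] ([] :: r :: rs) = ':' :: List.intercalate [':'] (r :: rs) := by
  cases rs <;> simp [List.intercalate]

theorem bodyA_eq_runs (l : List Char) : ∀ (c : Char),
    c.toString :: bodyA c l =
      (List.intercalate [':'] (pvRuns (c :: l))).map (fun c => c.toString) := by
  induction l with
  | nil => intro c; simp [pvRuns, bodyA, List.intercalate]
  | cons x xs ih =>
    intro c
    by_cases h : x = c
    · subst h
      have hr : pvRuns (x :: x :: xs) = (x :: x :: xs.takeWhile (· == x)) :: pvRuns (xs.dropWhile (· == x)) := by
        simp [pvRuns]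
      have hr2 : pvRuns (x :: xs) = (x :: xs.takeWhile (· == x)) :: pvRuns (xs.dropWhile (· == x)) := by
        simp [pvRuns]
      rw [hr, intercalate_colon_cons, ← hr2, List.map_cons, ← ih x]
      simp [bodyA]
    · have hr : pvRuns (c :: x :: xs) = [c] :: pvRuns (x :: xs) := by
        simp [pvRuns, h]
      have hne : ∃ r rs, pvRuns (x :: xs) = r :: rs :=
        ⟨x :: xs.takeWhile (· == x), pvRuns (xs.dropWhile (· == x)), by simp [pvRuns]⟩
      obtain ⟨r, rs, hrr⟩ := hne
      rw [hr, hrr, intercalate_colon_cons, intercalate_colon_nil_cons, ← hrr,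
        List.map_cons, List.map_cons, ← ih x]
      simp only [bodyA, ne_eq, h, not_false_eq_true, if_true]
      rfl

-- ===== VERDICT (by name: the statement is the Claim_ definition above) =====
theorem create_binary_list_with_separators_spec : Claim_equal_create_binary_list_with_separators := by
  intro s _ hpre
  unfold Spec_create_binary_list_with_separators create_binary_list_with_separators create_binary_list_with_separators_alt
  cases hl : s.toList with
  | nil =>
    exact absurd (by have := congrArg String.ofList hl; simpa using this) hpre
  | cons c rest =>
    have hget : PySem.Str.pyGet? s 0 = some c := by
      simp [PySem.Str.pyGet?, hl]
    rw [hget]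
    show (List.foldl (fun (st : Char × List String) char =>
        if char ≠ st.1 then (char, st.2 ++ [":", char.toString])
        else (st.1, st.2 ++ [char.toString])) (c, []) (c :: rest)).2 =
      (List.intercalate [':'] (pvRuns (c :: rest))).map (fun c => c.toString)
    rw [foldA_eq_bodyA]
    simp only [List.nil_append, bodyA, ne_eq, not_true_eq_false, if_false]
    exact bodyA_eq_runs rest c
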